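-- pv_equiv track=rewrite | github.com/nermadie/CodeForces_Solutions | Utils/BinarySearch.py | bs_last_exact_asc
-- ===== SOURCE A (Python) =====
-- def _init_lr(arr, l, r):
--     if l is None:
--         l = 0
--     if r is None:
--         r = len(arr) - 1
--     return l, r
--
-- def bs_last_exact_asc(arr, x, l=None, r=None):
--     l, r = _init_lr(arr, l, r)
--     res = -1
--     while l <= r:
--         m = (l + r) // 2
--         if arr[m] == x:
--             res = m
--             l = m + 1  # tìm LAST
--         elif arr[m] < x:
--             l = m + 1
--         else:
--             r = m - 1
--     return res
-- ===== SOURCE B (Python) =====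
-- def bs_last_exact_asc(arr, x, l=None, r=None):
--     base = 0 if l is None else l
--     hi = (len(arr) - 1 if r is None else r) + 1
--     lo = base
--     while lo < hi:
--         m = (lo + hi) // 2
--         if arr[m] <= x:
--             lo = m + 1
--         else:
--             hi = m
--     return lo - 1 if lo > base and arr[lo - 1] == x else -1
-- ===== Notes on version B (the rewrite author's own statement) =====
-- stated objective: simpler
-- what changed: Replaced A's three-branch while-loop with a res accumulator by a two-branch bisect_right-style upper-bound search followed by a single confirming equality check on the element just below the bound.
-- outside the precondition, e.g. on bs_last_exact_asc([2, 1], 1, None, None): A returns -1, B returns 1; on bs_last_exact_asc([1, 2], 1, -2, None): A returns -2, B returns 0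
import Mathlib
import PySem

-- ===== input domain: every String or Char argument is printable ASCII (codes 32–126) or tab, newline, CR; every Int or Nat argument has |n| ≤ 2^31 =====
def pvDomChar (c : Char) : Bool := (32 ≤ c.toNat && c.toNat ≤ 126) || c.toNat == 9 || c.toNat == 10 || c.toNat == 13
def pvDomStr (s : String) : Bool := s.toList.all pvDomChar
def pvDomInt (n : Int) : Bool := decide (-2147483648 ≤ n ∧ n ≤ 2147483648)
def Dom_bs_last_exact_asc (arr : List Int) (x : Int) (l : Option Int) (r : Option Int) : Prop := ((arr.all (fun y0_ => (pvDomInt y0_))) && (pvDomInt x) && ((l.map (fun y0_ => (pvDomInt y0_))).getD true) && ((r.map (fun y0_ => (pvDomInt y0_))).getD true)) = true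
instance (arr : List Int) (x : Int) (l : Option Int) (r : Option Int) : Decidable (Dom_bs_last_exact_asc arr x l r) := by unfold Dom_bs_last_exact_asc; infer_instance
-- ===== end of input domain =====

-- B replaces A's three-branch search with a res accumulator by a bisect_right-style
-- upper-bound search plus one final equality check (objective: simpler).

-- ===== PORT A =====
-- helper _init_lr: l = 0 if l is None; r = len(arr)-1 if r is None
def pvInitLr (arr : List Int) (l : Option Int) (r : Option Int) : Int × Int :=
  (l.getD 0, r.getD ((arr.length : Int) - 1))

-- the while-loop of A; state (res, l, r); `none` from pyGet? is Python's IndexError (excluded by Pre_)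
def pvLoopA (arr : List Int) (x : Int) (res l r : Int) : Int :=
  if h : l ≤ r then
    let m := PySem.Int.floordiv (l + r) 2
    match PySem.List.pyGet? arr m with
    | none => res
    | some v =>
      if v = x then pvLoopA arr x m (m + 1) r
      else if v < x then pvLoopA arr x res (m + 1) r
      else pvLoopA arr x res l (m - 1)
  else res
termination_by (r + 1 - l).toNat
decreasing_by
  all_goals
    have hm := PySem.Int.floordiv_two_mid_bounds h
    omega

def bs_last_exact_asc (arr : List Int) (x : Int) (l : Option Int) (r : Option Int) : Int :=
  let p := pvInitLr arr l r
  pvLoopA arr x (-1) p.1 p.2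

-- ===== PORT B =====
-- the upper-bound (bisect_right) while-loop of B; `none` from pyGet? is Python's IndexError (excluded by Pre_)
def pvUB (arr : List Int) (x : Int) (lo hi : Int) : Int :=
  if h : lo < hi then
    let m := PySem.Int.floordiv (lo + hi) 2
    match PySem.List.pyGet? arr m with
    | none => lo
    | some v =>
      if v ≤ x then pvUB arr x (m + 1) hi else pvUB arr x lo m
  else lo
termination_by (hi - lo).toNat
decreasing_by
  all_goals
    have hm := PySem.Int.floordiv_two_mid_bounds (le_of_lt h)
    have hm2 : PySem.Int.floordiv (lo + hi) 2 < hi :=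
      (PySem.Int.floordiv_lt_iff_lt_mul (by omega)).mpr (by omega)
    omega

def bs_last_exact_asc_alt (arr : List Int) (x : Int) (l : Option Int) (r : Option Int) : Int :=
  let base := l.getD 0
  let hi := r.getD ((arr.length : Int) - 1) + 1
  let lo := pvUB arr x base hi
  if base < lo then
    match PySem.List.pyGet? arr (lo - 1) with
    | none => -1   -- unreachable under Pre_ (the and-guard's index is then in range)
    | some v => if v = x then lo - 1 else -1
  else -1

-- ===== PRECONDITION & SPEC =====
-- Pre_ requires that, whenever the searched segment [l, r] is nonempty, it lies inside the list
-- (0 ≤ l, r < len) and is sorted non-decreasing: outside it A either raises IndexError or returns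
-- a value that is an artefact of binary search on an unsorted segment / of negative-index wraparound.
def Pre_bs_last_exact_asc (arr : List Int) (x : Int) (l : Option Int) (r : Option Int) : Prop :=
  l.getD 0 ≤ r.getD ((arr.length : Int) - 1) →
    (0 ≤ l.getD 0 ∧ r.getD ((arr.length : Int) - 1) ≤ (arr.length : Int) - 1 ∧
     ((arr.drop (l.getD 0).toNat).take
        (r.getD ((arr.length : Int) - 1) - l.getD 0 + 1).toNat).Pairwise (· ≤ ·))
instance (arr : List Int) (x : Int) (l : Option Int) (r : Option Int) : Decidable (Pre_bs_last_exact_asc arr x l r) := by unfold Pre_bs_last_exact_asc; infer_instance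

def pvWitness_bs_last_exact_asc : List Int × Int × Option Int × Option Int :=
  ([1, 2, 2, 3], 2, none, none)

def Spec_bs_last_exact_asc (arr : List Int) (x : Int) (l : Option Int) (r : Option Int) (out : Int) : Prop := out = bs_last_exact_asc_alt arr x l r
instance (arr : List Int) (x : Int) (l : Option Int) (r : Option Int) (out : Int) : Decidable (Spec_bs_last_exact_asc arr x l r out) := by unfold Spec_bs_last_exact_asc; infer_instance

-- ===== CLAIM (what is proved, stated in full; the proofs are below) =====
def Claim_equal_bs_last_exact_asc : Prop := ∀ (arr : List Int) (x : Int) (l : Option Int) (r : Option Int), Dom_bs_last_exact_asc arr x l r → Pre_bs_last_exact_asc arr x l r → Spec_bs_last_exact_asc arr x l r (bs_last_exact_asc arr x l r)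

-- ===== LEMMAS AND PROOFS =====

-- spec helper: greatest index i in [l, r] with arr[i] == x, scanned from the right
def pvLast (arr : List Int) (x : Int) (l r : Int) : Option Int :=
  if h : l ≤ r then
    if PySem.List.pyGet? arr r = some x then some r else pvLast arr x l (r - 1)
  else none
termination_by (r + 1 - l).toNat

theorem pvLast_none (arr : List Int) (x : Int) (l r : Int)
    (h : ∀ i, l ≤ i → i ≤ r → PySem.List.pyGet? arr i ≠ some x) :
    pvLast arr x l r = none := by
  rw [pvLast]
  split
  · rename_i hlr
    rw [if_neg (h r hlr le_rfl)]
    exact pvLast_none arr x l (r - 1) (fun i h1 h2 => h i h1 (by omega))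
  · rfl
termination_by (r + 1 - l).toNat

theorem pvLast_some (arr : List Int) (x : Int) (l r : Int)
    (hlr : l ≤ r) (hr : PySem.List.pyGet? arr r = some x) :
    pvLast arr x l r = some r := by
  rw [pvLast]; simp [hlr, hr]

theorem pvLast_split (arr : List Int) (x : Int) (l k r : Int)
    (h1 : l - 1 ≤ k) (h2 : k ≤ r) :
    pvLast arr x l r = (pvLast arr x (k + 1) r).orElse (fun _ => pvLast arr x l k) := by
  rcases eq_or_lt_of_le h2 with heq | hlt
  · subst heq
    rw [show pvLast arr x (k + 1) k = none by rw [pvLast]; simp]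
    rfl
  · have hlr : l ≤ r := by omega
    have hkr : k + 1 ≤ r := by omega
    rw [pvLast, dif_pos hlr, show pvLast arr x (k + 1) r =
      if PySem.List.pyGet? arr r = some x then some r else pvLast arr x (k + 1) (r - 1) by
        rw [pvLast, dif_pos hkr]]
    split
    · rfl
    · exact pvLast_split arr x l k (r - 1) h1 (by omega)
termination_by (r - k).toNat

-- the values of arr are non-decreasing at integer indices within [lB, rB]
def pvMono (arr : List Int) (lB rB : Int) : Prop :=
  ∀ i j vi vj, lB ≤ i → i ≤ j → j ≤ rB → 0 ≤ i →
    PySem.List.pyGet? arr i = some vi → PySem.List.pyGet? arr j = some vj → vi ≤ vj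

theorem mono_of_seg (arr : List Int) (a b : Int) (h0 : 0 ≤ a)
    (hs : ((arr.drop a.toNat).take (b - a + 1).toNat).Pairwise (· ≤ ·)) :
    pvMono arr a b := by
  intro i j vi vj h1 h2 h3 h4 hvi hvj
  rw [PySem.List.pyGet?_of_nonneg arr h4] at hvi
  rw [PySem.List.pyGet?_of_nonneg arr (by omega)] at hvj
  rw [List.getElem?_eq_some_iff] at hvi hvj
  obtain ⟨hi1, hi2⟩ := hvi
  obtain ⟨hj1, hj2⟩ := hvj
  subst hi2 hj2
  rcases eq_or_lt_of_le (show i.toNat ≤ j.toNat by omega) with heq | hlt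
  · simp [heq]
  · have hlen : ((arr.drop a.toNat).take (b - a + 1).toNat).length
        = min (b - a + 1).toNat (arr.length - a.toNat) := by simp
    have hp : i.toNat - a.toNat < ((arr.drop a.toNat).take (b - a + 1).toNat).length := by omega
    have hq : j.toNat - a.toNat < ((arr.drop a.toNat).take (b - a + 1).toNat).length := by omega
    have := (List.pairwise_iff_getElem.mp hs) _ _ hp hq (by omega)
    simpa [List.getElem_take, List.getElem_drop,
      show a.toNat + (i.toNat - a.toNat) = i.toNat by omega,
      show a.toNat + (j.toNat - a.toNat) = j.toNat by omega] using this

theorem get_total (arr : List Int) (i : Int) (h0 : 0 ≤ i) (h1 : i < (arr.length : Int)) :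
    ∃ v, PySem.List.pyGet? arr i = some v :=
  ⟨_, PySem.List.pyGet?_eq_some_getElem arr h0 h1⟩

theorem loopA_char (arr : List Int) (x : Int) (lB rB : Int) (hmono : pvMono arr lB rB)
    (l r res : Int) (hl : 0 ≤ l) (hr : r ≤ (arr.length : Int) - 1)
    (hlb : lB ≤ l) (hrb : r ≤ rB) :
    pvLoopA arr x res l r = (match pvLast arr x l r with | some i => i | none => res) := by
  rw [pvLoopA]
  split
  · rename_i hlr
    have hm := PySem.Int.floordiv_two_mid_bounds hlr
    obtain ⟨v, hv⟩ := get_total arr (PySem.Int.floordiv (l + r) 2) (by omega) (by omega)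
    dsimp only
    rw [hv]
    dsimp only
    split_ifs with h1 h2
    · rw [h1] at hv
      rw [loopA_char arr x lB rB hmono (PySem.Int.floordiv (l + r) 2 + 1) r _ (by omega) hr (by omega) hrb,
          pvLast_split arr x l (PySem.Int.floordiv (l + r) 2) r (by omega) (by omega),
          pvLast_some arr x l (PySem.Int.floordiv (l + r) 2) (by omega) hv]
      cases pvLast arr x (PySem.Int.floordiv (l + r) 2 + 1) r <;> simp [Option.orElse]
    · rw [loopA_char arr x lB rB hmono (PySem.Int.floordiv (l + r) 2 + 1) r res (by omega) hr (by omega) hrb,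
          pvLast_split arr x l (PySem.Int.floordiv (l + r) 2) r (by omega) (by omega),
          pvLast_none arr x l (PySem.Int.floordiv (l + r) 2) ?hside]
      case hside =>
        intro i hi1 hi2 hc
        have := hmono i (PySem.Int.floordiv (l + r) 2) x v (by omega) hi2 (by omega) (by omega) hc hv
        omega
      cases pvLast arr x (PySem.Int.floordiv (l + r) 2 + 1) r <;> simp [Option.orElse]
    · rw [loopA_char arr x lB rB hmono l (PySem.Int.floordiv (l + r) 2 - 1) res hl (by omega) hlb (by omega),
          pvLast_split arr x l (PySem.Int.floordiv (l + r) 2 - 1) r (by omega) (by omega),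
          pvLast_none arr x (PySem.Int.floordiv (l + r) 2 - 1 + 1) r ?hside2]
      case hside2 =>
        intro i hi1 hi2 hc
        have := hmono (PySem.Int.floordiv (l + r) 2) i v x (by omega) (by omega) (by omega) (by omega) hv hc
        omega
      cases pvLast arr x l (PySem.Int.floordiv (l + r) 2 - 1) <;> simp [Option.orElse]
  · rename_i hlr
    rw [show pvLast arr x l r = none by rw [pvLast]; simp only [dif_neg hlr]]
termination_by (r + 1 - l).toNat

theorem ub_spec (arr : List Int) (x : Int) (lB rB : Int) (hmono : pvMono arr lB rB)
    (lo hi : Int) (h0 : 0 ≤ lo) (hlh : lo ≤ hi) (hhi : hi ≤ (arr.length : Int))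
    (hlb : lB ≤ lo) (hrb : hi ≤ rB + 1) :
    lo ≤ pvUB arr x lo hi ∧ pvUB arr x lo hi ≤ hi ∧
    (∀ i, lo ≤ i → i < pvUB arr x lo hi → ∃ v, PySem.List.pyGet? arr i = some v ∧ v ≤ x) ∧
    (∀ i, pvUB arr x lo hi ≤ i → i < hi → ∃ v, PySem.List.pyGet? arr i = some v ∧ x < v) := by
  rw [pvUB]
  split
  · rename_i hlt
    have hm := PySem.Int.floordiv_two_mid_bounds (le_of_lt hlt)
    have hm2 : PySem.Int.floordiv (lo + hi) 2 < hi :=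
      (PySem.Int.floordiv_lt_iff_lt_mul (by omega)).mpr (by omega)
    obtain ⟨v, hv⟩ := get_total arr (PySem.Int.floordiv (lo + hi) 2) (by omega) (by omega)
    dsimp only
    rw [hv]
    dsimp only
    split_ifs with hvx
    · obtain ⟨u1, u2, u3, u4⟩ := ub_spec arr x lB rB hmono (PySem.Int.floordiv (lo + hi) 2 + 1) hi
        (by omega) (by omega) hhi (by omega) hrb
      refine ⟨by omega, u2, ?_, u4⟩
      intro i hi1 hi2
      by_cases hcase : PySem.Int.floordiv (lo + hi) 2 + 1 ≤ i
      · exact u3 i hcase hi2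
      · obtain ⟨vi, hvi⟩ := get_total arr i (by omega) (by omega)
        exact ⟨vi, hvi, le_trans
          (hmono i (PySem.Int.floordiv (lo + hi) 2) vi v (by omega) (by omega) (by omega) (by omega) hvi hv) hvx⟩
    · obtain ⟨u1, u2, u3, u4⟩ := ub_spec arr x lB rB hmono lo (PySem.Int.floordiv (lo + hi) 2)
        h0 (by omega) (by omega) hlb (by omega)
      refine ⟨u1, by omega, u3, ?_⟩
      intro i hi1 hi2
      by_cases hcase : i < PySem.Int.floordiv (lo + hi) 2
      · exact u4 i hi1 hcase
      · obtain ⟨vi, hvi⟩ := get_total arr i (by omega) (by omega)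
        exact ⟨vi, hvi, lt_of_lt_of_le (by omega)
          (hmono (PySem.Int.floordiv (lo + hi) 2) i v vi (by omega) (by omega) (by omega) (by omega) hv hvi)⟩
  · rename_i hge
    exact ⟨le_rfl, hlh, fun i h1 h2 => absurd h1 (by omega), fun i h1 h2 => absurd h2 (by omega)⟩
termination_by (hi - lo).toNat

-- ===== VERDICT (by name: the statement is the Claim_ definition above) =====
theorem bs_last_exact_asc_spec : Claim_equal_bs_last_exact_asc := by
  intro arr x l r _ hpre
  unfold Spec_bs_last_exact_asc bs_last_exact_asc bs_last_exact_asc_alt pvInitLr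
  dsimp only
  by_cases hbh : l.getD 0 ≤ r.getD ((arr.length : Int) - 1)
  · obtain ⟨hl, hr, hseg⟩ := hpre hbh
    have hmono := mono_of_seg arr (l.getD 0) (r.getD ((arr.length : Int) - 1)) hl hseg
    rw [loopA_char arr x (l.getD 0) (r.getD ((arr.length : Int) - 1)) hmono
        (l.getD 0) (r.getD ((arr.length : Int) - 1)) (-1) hl hr le_rfl le_rfl]
    obtain ⟨u1, u2, u3, u4⟩ := ub_spec arr x (l.getD 0) (r.getD ((arr.length : Int) - 1)) hmono
      (l.getD 0) (r.getD ((arr.length : Int) - 1) + 1) hl (by omega) (by omega) le_rfl le_rfl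
    set u := pvUB arr x (l.getD 0) (r.getD ((arr.length : Int) - 1) + 1) with hu
    by_cases hub : l.getD 0 < u
    · obtain ⟨v, hv, hvx⟩ := u3 (u - 1) (by omega) (by omega)
      rw [if_pos hub, hv]
      dsimp only
      by_cases hveq : v = x
      · rw [if_pos hveq]
        rw [pvLast_split arr x (l.getD 0) (u - 1) (r.getD ((arr.length : Int) - 1)) (by omega) (by omega),
            pvLast_none arr x (u - 1 + 1) (r.getD ((arr.length : Int) - 1)) ?hnone1,
            pvLast_some arr x (l.getD 0) (u - 1) (by omega) (hveq ▸ hv)]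
        case hnone1 =>
          intro i hi1 hi2 hc
          obtain ⟨vi, hvi, hvix⟩ := u4 i (by omega) (by omega)
          rw [hc, Option.some_inj] at hvi
          omega
        rfl
      · rw [if_neg hveq]
        rw [pvLast_none arr x (l.getD 0) (r.getD ((arr.length : Int) - 1)) ?hnone2]
        case hnone2 =>
          intro i hi1 hi2 hc
          by_cases hiu : u ≤ i
          · obtain ⟨vi, hvi, hvix⟩ := u4 i hiu (by omega)
            rw [hc, Option.some_inj] at hvi
            omega
          · have := hmono i (u - 1) x v (by omega) (by omega) (by omega) (by omega) hc hv
            omega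
    · rw [if_neg hub]
      rw [pvLast_none arr x (l.getD 0) (r.getD ((arr.length : Int) - 1)) ?hnone3]
      case hnone3 =>
        intro i hi1 hi2 hc
        obtain ⟨vi, hvi, hvix⟩ := u4 i (by omega) (by omega)
        rw [hc, Option.some_inj] at hvi
        omega
  · have hu : pvUB arr x (l.getD 0) (r.getD ((arr.length : Int) - 1) + 1) = l.getD 0 := by
      rw [pvUB]
      simp only [dif_neg (show ¬ l.getD 0 < r.getD ((arr.length : Int) - 1) + 1 by omega)]
    have hA : pvLoopA arr x (-1) (l.getD 0) (r.getD ((arr.length : Int) - 1)) = -1 := by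
      rw [pvLoopA]
      simp only [dif_neg (show ¬ l.getD 0 ≤ r.getD ((arr.length : Int) - 1) from hbh)]
    rw [hA, hu, if_neg (lt_irrefl _)]
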